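-- pv_equiv track=rewrite | github.com/sstarodubov/algorithm_research | python/leetcode/ya/main.py | space
-- ===== SOURCE A (Python) =====
-- def space(i, arr):
--     l, r = i - 1, i + 1
--     d = 0
--     while l >= 0 and r < len(arr):
--         if arr[l] == 0 and arr[r] == 0:
--             d += 2
--             l -= 1
--             r += 1
--         elif arr[l] == 1 and arr[r] == 0:
--             d += 1
--             return d
--         elif arr[l] == 0 and arr[r] == 1:
--             d += 1
--             return d
--         else:
--             return d
--     return d
-- ===== SOURCE B (Python) =====
-- def space(i, arr):
--     n = len(arr)
--     lrun = 0
--     idx = i - 1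
--     while 0 <= idx < n and arr[idx] == 0:
--         lrun += 1
--         idx -= 1
--     rrun = 0
--     idx = i + 1
--     while 0 <= idx < n and arr[idx] == 0:
--         rrun += 1
--         idx += 1
--     m = min(lrun, rrun)
--     d = 2 * m
--     l, r = i - (m + 1), i + (m + 1)
--     if 0 <= l and r < n and (arr[l], arr[r]) in ((1, 0), (0, 1)):
--         d += 1
--     return d
-- ===== Notes on version B (the rewrite author's own statement) =====
-- stated objective: alternative
-- what changed: Replaced A's single coupled expanding two-pointer loop with two independent run-length scans (zeros left of i, zeros right of i) combined arithmetically, plus one explicit boundary-pair check for the +1 case.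
import Mathlib
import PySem

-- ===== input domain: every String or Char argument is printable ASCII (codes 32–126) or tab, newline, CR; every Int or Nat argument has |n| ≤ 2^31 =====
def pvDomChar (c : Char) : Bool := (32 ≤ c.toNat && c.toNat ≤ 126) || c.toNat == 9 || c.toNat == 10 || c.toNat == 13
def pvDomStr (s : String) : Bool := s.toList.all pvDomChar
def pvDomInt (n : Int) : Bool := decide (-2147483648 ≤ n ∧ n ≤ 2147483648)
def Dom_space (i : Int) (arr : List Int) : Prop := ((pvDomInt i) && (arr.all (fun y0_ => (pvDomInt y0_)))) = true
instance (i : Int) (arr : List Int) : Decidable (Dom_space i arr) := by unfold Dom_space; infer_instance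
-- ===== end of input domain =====

-- B replaces A's coupled expanding two-pointer loop with two independent run-length
-- scans and an arithmetic combine plus one boundary-pair check (alternative decomposition).


-- ===== PORT A =====
-- A's while loop, as structural recursion on a fuel counter that strictly exceeds the
-- possible number of iterations (the loop runs only while 0 ≤ l < r < len, so at most
-- len iterations); arr[l]/arr[r] are only read under the guard 0 ≤ l ∧ r < len, so the
-- in-bounds read is PySem.List.pyGet? with getD 0 (the default is never used).
def spaceLoop (arr : List Int) : Nat → Int → Int → Int → Int
  | 0, _, _, d => d
  | fuel + 1, l, r, d =>
    if 0 ≤ l ∧ r < (arr.length : Int) then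
      let al := (PySem.List.pyGet? arr l).getD 0
      let ar := (PySem.List.pyGet? arr r).getD 0
      if al = 0 ∧ ar = 0 then spaceLoop arr fuel (l - 1) (r + 1) (d + 2)
      else if al = 1 ∧ ar = 0 then d + 1
      else if al = 0 ∧ ar = 1 then d + 1
      else d
    else d

def space (i : Int) (arr : List Int) : Int :=
  spaceLoop arr (arr.length + 1) (i - 1) (i + 1) 0

-- ===== PORT B =====
-- run of consecutive zeros scanning left from idx (in-bounds reads only); fuel as above
def runLeft (arr : List Int) : Nat → Int → Int
  | 0, _ => 0
  | fuel + 1, idx =>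
    if 0 ≤ idx ∧ idx < (arr.length : Int) ∧ (PySem.List.pyGet? arr idx).getD 0 = 0 then
      1 + runLeft arr fuel (idx - 1)
    else 0

-- run of consecutive zeros scanning right from idx
def runRight (arr : List Int) : Nat → Int → Int
  | 0, _ => 0
  | fuel + 1, idx =>
    if 0 ≤ idx ∧ idx < (arr.length : Int) ∧ (PySem.List.pyGet? arr idx).getD 0 = 0 then
      1 + runRight arr fuel (idx + 1)
    else 0

def space_alt (i : Int) (arr : List Int) : Int :=
  let n : Int := arr.length
  let lrun := runLeft arr (arr.length + 1) (i - 1)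
  let rrun := runRight arr (arr.length + 1) (i + 1)
  let m := min lrun rrun
  let d := 2 * m
  let l := i - (m + 1)
  let r := i + (m + 1)
  if 0 ≤ l ∧ r < n ∧
      (((PySem.List.pyGet? arr l).getD 0, (PySem.List.pyGet? arr r).getD 0) = ((1 : Int), (0 : Int)) ∨
       ((PySem.List.pyGet? arr l).getD 0, (PySem.List.pyGet? arr r).getD 0) = ((0 : Int), (1 : Int)))
  then d + 1 else d

-- ===== PRECONDITION & SPEC =====
def Spec_space (i : Int) (arr : List Int) (out : Int) : Prop := out = space_alt i arr
instance (i : Int) (arr : List Int) (out : Int) : Decidable (Spec_space i arr out) := by unfold Spec_space; infer_instance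

-- ===== CLAIM (what is proved, stated in full; the proofs are below) =====
def Claim_equal_space : Prop := ∀ (i : Int) (arr : List Int), Dom_space i arr → Spec_space i arr (space i arr)

-- ===== LEMMAS AND PROOFS =====

-- the "+1" bonus of B at explicit pointers
def bonusAt (arr : List Int) (l r : Int) : Int :=
  if 0 ≤ l ∧ r < (arr.length : Int) ∧
      (((PySem.List.pyGet? arr l).getD 0, (PySem.List.pyGet? arr r).getD 0) = ((1 : Int), (0 : Int)) ∨
       ((PySem.List.pyGet? arr l).getD 0, (PySem.List.pyGet? arr r).getD 0) = ((0 : Int), (1 : Int)))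
  then 1 else 0

-- the "+1" bonus of B, as a function of the loop's current pointers (B's canonical fuel)
def bonus (arr : List Int) (l r : Int) : Int :=
  bonusAt arr
    (l - min (runLeft arr (arr.length + 1) l) (runRight arr (arr.length + 1) r))
    (r + min (runLeft arr (arr.length + 1) l) (runRight arr (arr.length + 1) r))

theorem runLeft_nonneg (arr : List Int) : ∀ (f : Nat) (idx : Int), 0 ≤ runLeft arr f idx := by
  intro f
  induction f with
  | zero => intro idx; simp [runLeft]
  | succ f ih =>
    intro idx
    simp only [runLeft]
    split
    · have := ih (idx - 1); omega
    · omega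

theorem runRight_nonneg (arr : List Int) : ∀ (f : Nat) (idx : Int), 0 ≤ runRight arr f idx := by
  intro f
  induction f with
  | zero => intro idx; simp [runRight]
  | succ f ih =>
    intro idx
    simp only [runRight]
    split
    · have := ih (idx + 1); omega
    · omega

-- fuel irrelevance: any fuel ≥ min(idx+1, len) computes the same left run
theorem runLeft_fuel (arr : List Int) :
    ∀ (f g : Nat) (idx : Int),
      (min (idx + 1) ((arr.length : Int))).toNat ≤ f →
      (min (idx + 1) ((arr.length : Int))).toNat ≤ g →
      runLeft arr f idx = runLeft arr g idx := by
  intro f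
  induction f with
  | zero =>
    intro g idx hf hg
    cases g with
    | zero => rfl
    | succ g =>
      simp only [runLeft]
      rw [if_neg]
      intro hc
      omega
  | succ f ih =>
    intro g idx hf hg
    cases g with
    | zero =>
      simp only [runLeft]
      rw [if_neg]
      intro hc
      omega
    | succ g =>
      simp only [runLeft]
      split
      · rename_i hc
        have := ih g (idx - 1) (by omega) (by omega)
        omega
      · rfl

theorem runRight_fuel (arr : List Int) :
    ∀ (f g : Nat) (idx : Int),
      (min ((arr.length : Int) - idx) ((arr.length : Int))).toNat ≤ f →
      (min ((arr.length : Int) - idx) ((arr.length : Int))).toNat ≤ g →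
      runRight arr f idx = runRight arr g idx := by
  intro f
  induction f with
  | zero =>
    intro g idx hf hg
    cases g with
    | zero => rfl
    | succ g =>
      simp only [runRight]
      rw [if_neg]
      intro hc
      omega
  | succ f ih =>
    intro g idx hf hg
    cases g with
    | zero =>
      simp only [runRight]
      rw [if_neg]
      intro hc
      omega
    | succ g =>
      simp only [runRight]
      split
      · rename_i hc
        have := ih g (idx + 1) (by omega) (by omega)
        omega
      · rfl

-- one-step unfolding at B's canonical fuel
theorem runLeft_step (arr : List Int) (idx : Int) :
    runLeft arr (arr.length + 1) idx
      = if 0 ≤ idx ∧ idx < (arr.length : Int) ∧ (PySem.List.pyGet? arr idx).getD 0 = 0 then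
          1 + runLeft arr (arr.length + 1) (idx - 1)
        else 0 := by
  conv_lhs => rw [runLeft]
  split
  · have := runLeft_fuel arr arr.length (arr.length + 1) (idx - 1) (by omega) (by omega)
    omega
  · rfl

theorem runRight_step (arr : List Int) (idx : Int) :
    runRight arr (arr.length + 1) idx
      = if 0 ≤ idx ∧ idx < (arr.length : Int) ∧ (PySem.List.pyGet? arr idx).getD 0 = 0 then
          1 + runRight arr (arr.length + 1) (idx + 1)
        else 0 := by
  conv_lhs => rw [runRight]
  split
  · have := runRight_fuel arr arr.length (arr.length + 1) (idx + 1) (by omega) (by omega)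
    omega
  · rfl

theorem bonusAt_out_left (arr : List Int) (l r : Int) (h : ¬ 0 ≤ l) :
    bonusAt arr l r = 0 := by
  unfold bonusAt; rw [if_neg]; intro hc; exact h hc.1

theorem bonusAt_out_right (arr : List Int) (l r : Int) (h : ¬ r < (arr.length : Int)) :
    bonusAt arr l r = 0 := by
  unfold bonusAt; rw [if_neg]; intro hc; exact h hc.2.1

theorem bonus_degenerate (arr : List Int) (l r : Int) (h : ¬ (0 ≤ l ∧ r < (arr.length : Int))) :
    2 * min (runLeft arr (arr.length + 1) l) (runRight arr (arr.length + 1) r) + bonus arr l r = 0 := by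
  have hln := runLeft_nonneg arr (arr.length + 1) l
  have hrn := runRight_nonneg arr (arr.length + 1) r
  by_cases hl : 0 ≤ l
  · have hr : ¬ r < (arr.length : Int) := fun hc => h ⟨hl, hc⟩
    have hr0 : runRight arr (arr.length + 1) r = 0 := by
      rw [runRight_step, if_neg]; intro hc; exact hr hc.2.1
    have hm : min (runLeft arr (arr.length + 1) l) (runRight arr (arr.length + 1) r) = 0 := by omega
    unfold bonus
    rw [hm, bonusAt_out_right arr _ _ (by omega)]
    omega
  · have hl0 : runLeft arr (arr.length + 1) l = 0 := by
      rw [runLeft_step, if_neg]; intro hc; exact hl hc.1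
    have hm : min (runLeft arr (arr.length + 1) l) (runRight arr (arr.length + 1) r) = 0 := by omega
    unfold bonus
    rw [hm, bonusAt_out_left arr _ _ (by omega)]
    omega

theorem loop_eq (arr : List Int) :
    ∀ (k : Nat) (l r d : Int),
      (((arr.length : Int) - r).toNat ≤ k ∨ l < 0) → l < r →
      spaceLoop arr k l r d
        = d + 2 * min (runLeft arr (arr.length + 1) l) (runRight arr (arr.length + 1) r)
            + bonus arr l r := by
  intro k
  induction k with
  | zero =>
    intro l r d hk hlr
    have hg : ¬ (0 ≤ l ∧ r < (arr.length : Int)) := by omega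
    have := bonus_degenerate arr l r hg
    simp only [spaceLoop]
    omega
  | succ k ih =>
    intro l r d hk hlr
    simp only [spaceLoop]
    split
    · rename_i hg
      obtain ⟨hl, hr⟩ := hg
      set al := (PySem.List.pyGet? arr l).getD 0 with hal
      set ar := (PySem.List.pyGet? arr r).getD 0 with har
      have hrl : runLeft arr (arr.length + 1) l
          = if al = 0 then 1 + runLeft arr (arr.length + 1) (l - 1) else 0 := by
        rw [runLeft_step]
        by_cases h0 : al = 0
        · rw [if_pos ⟨hl, by omega, h0⟩, if_pos h0]
        · rw [if_neg (fun hc => h0 hc.2.2), if_neg h0]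
      have hrr : runRight arr (arr.length + 1) r
          = if ar = 0 then 1 + runRight arr (arr.length + 1) (r + 1) else 0 := by
        rw [runRight_step]
        by_cases h0 : ar = 0
        · rw [if_pos ⟨by omega, hr, h0⟩, if_pos h0]
        · rw [if_neg (fun hc => h0 hc.2.2), if_neg h0]
      by_cases h00 : al = 0 ∧ ar = 0
      · rw [if_pos h00]
        rw [ih (l - 1) (r + 1) (d + 2) (by omega) (by omega)]
        have h1 : runLeft arr (arr.length + 1) l = 1 + runLeft arr (arr.length + 1) (l - 1) := by
          rw [hrl, if_pos h00.1]
        have h2 : runRight arr (arr.length + 1) r = 1 + runRight arr (arr.length + 1) (r + 1) := by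
          rw [hrr, if_pos h00.2]
        have hmin : min (runLeft arr (arr.length + 1) l) (runRight arr (arr.length + 1) r)
            = 1 + min (runLeft arr (arr.length + 1) (l - 1)) (runRight arr (arr.length + 1) (r + 1)) := by
          rw [h1, h2]; omega
        have hb : bonus arr l r = bonus arr (l - 1) (r + 1) := by
          unfold bonus
          rw [hmin]
          have e1 : l - (1 + min (runLeft arr (arr.length + 1) (l - 1)) (runRight arr (arr.length + 1) (r + 1)))
              = l - 1 - min (runLeft arr (arr.length + 1) (l - 1)) (runRight arr (arr.length + 1) (r + 1)) := by ring
          have e2 : r + (1 + min (runLeft arr (arr.length + 1) (l - 1)) (runRight arr (arr.length + 1) (r + 1)))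
              = r + 1 + min (runLeft arr (arr.length + 1) (l - 1)) (runRight arr (arr.length + 1) (r + 1)) := by ring
          rw [e1, e2]
        rw [hb]
        omega
      · rw [if_neg h00]
        have hmin0 : min (runLeft arr (arr.length + 1) l) (runRight arr (arr.length + 1) r) = 0 := by
          have hln := runLeft_nonneg arr (arr.length + 1) (l - 1)
          have hrn := runRight_nonneg arr (arr.length + 1) (r + 1)
          by_cases ha : al = 0
          · have har0 : ar ≠ 0 := fun h => h00 ⟨ha, h⟩
            rw [hrl, hrr, if_pos ha, if_neg har0]; omega
          · rw [hrl, hrr, if_neg ha]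
            split <;> omega
        have hb : bonus arr l r
            = if (al, ar) = ((1 : Int), 0) ∨ (al, ar) = ((0 : Int), 1) then 1 else 0 := by
          unfold bonus bonusAt
          rw [hmin0]
          have e1 : l - (0 : Int) = l := by ring
          have e2 : r + (0 : Int) = r := by ring
          rw [e1, e2, ← hal, ← har]
          by_cases hc : (al, ar) = ((1 : Int), 0) ∨ (al, ar) = ((0 : Int), 1)
          · rw [if_pos ⟨hl, hr, hc⟩, if_pos hc]
          · rw [if_neg (fun h => hc h.2.2), if_neg hc]
        rw [hmin0]
        by_cases h10 : al = 1 ∧ ar = 0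
        · rw [if_pos h10, hb, if_pos (Or.inl (by rw [h10.1, h10.2]))]; ring
        · rw [if_neg h10]
          by_cases h01 : al = 0 ∧ ar = 1
          · rw [if_pos h01, hb, if_pos (Or.inr (by rw [h01.1, h01.2]))]; ring
          · rw [if_neg h01, hb, if_neg]
            · ring
            · rintro (hc | hc) <;> simp only [Prod.mk.injEq] at hc
              · exact h10 hc
              · exact h01 hc
    · rename_i hg
      have := bonus_degenerate arr l r hg
      omega

-- ===== VERDICT (by name: the statement is the Claim_ definition above) =====
theorem space_spec : Claim_equal_space := by
  intro i arr _
  unfold Spec_space space space_alt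
  rw [loop_eq arr (arr.length + 1) (i - 1) (i + 1) 0 (by omega) (by omega)]
  unfold bonus bonusAt
  have e1 : i - 1 - min (runLeft arr (arr.length + 1) (i - 1)) (runRight arr (arr.length + 1) (i + 1))
      = i - (min (runLeft arr (arr.length + 1) (i - 1)) (runRight arr (arr.length + 1) (i + 1)) + 1) := by ring
  have e2 : i + 1 + min (runLeft arr (arr.length + 1) (i - 1)) (runRight arr (arr.length + 1) (i + 1))
      = i + (min (runLeft arr (arr.length + 1) (i - 1)) (runRight arr (arr.length + 1) (i + 1)) + 1) := by ring
  rw [e1, e2]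
  split
  · rename_i h
    rw [if_pos h]
    ring
  · rename_i h
    rw [if_neg h]
    ring
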